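-- pv_equiv track=rewrite | github.com/QSiming/DSC40B_SP26_STARTERCODE | problems/practice/167/code.py | boo
-- ===== SOURCE A (Python) =====
-- def boo(first_list, second_list):
--     """first_list and second_list are both of size n"""
--     n = len(first_list)
--     for x in second_list:
--         count = 0
--         for y in first_list:
--             if x == y:
--                 count += 1
--             if count >= n // 2:
--                 return True
--     return False
-- ===== SOURCE B (Python) =====
-- def _bsearch(srt, x, strict):
--     # first index i in sorted srt with srt[i] > x (strict) / srt[i] >= x (not strict)
--     lo, hi = 0, len(srt)
--     while lo < hi:
--         mid = (lo + hi) // 2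
--         if srt[mid] < x or (strict and srt[mid] == x):
--             lo = mid + 1
--         else:
--             hi = mid
--     return lo
--
-- def boo(first_list, second_list):
--     if not first_list:
--         return False
--     srt = sorted(first_list)
--     half = len(srt) // 2
--     for x in second_list:
--         if _bsearch(srt, x, True) - _bsearch(srt, x, False) >= half:
--             return True
--     return False
-- ===== Notes on version B (the rewrite author's own statement) =====
-- stated objective: faster
-- what changed: Replaced A's per-candidate linear rescan of first_list by sorting first_list once and computing each candidate's count as the difference of two hand-written binary searches (upper bound minus lower bound) on the sorted copy.
import Mathlib
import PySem

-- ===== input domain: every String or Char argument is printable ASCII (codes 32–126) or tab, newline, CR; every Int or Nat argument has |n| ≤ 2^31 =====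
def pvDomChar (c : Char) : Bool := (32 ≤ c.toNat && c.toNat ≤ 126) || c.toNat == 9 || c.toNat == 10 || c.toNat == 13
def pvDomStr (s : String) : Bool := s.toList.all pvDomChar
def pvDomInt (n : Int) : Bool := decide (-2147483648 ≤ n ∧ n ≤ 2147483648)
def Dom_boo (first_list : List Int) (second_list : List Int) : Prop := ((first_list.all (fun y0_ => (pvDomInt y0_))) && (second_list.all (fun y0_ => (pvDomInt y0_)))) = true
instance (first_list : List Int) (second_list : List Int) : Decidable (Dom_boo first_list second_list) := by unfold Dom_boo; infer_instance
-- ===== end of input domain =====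

-- B sorts first_list once and counts each candidate by two hand-written binary searches (faster: O((n+m) log n) vs A's O(n*m)).


-- ===== PORT A =====
-- inner 'for y in first_list' loop with the running count and the early return
def booInner (x : Int) (n : Int) (count : Int) : List Int → Bool
  | [] => false
  | y :: ys =>
    let count' := if x == y then count + 1 else count
    if count' ≥ PySem.Int.floordiv n 2 then true else booInner x n count' ys

-- outer 'for x in second_list' loop
def booOuter (first_list : List Int) (n : Int) : List Int → Bool
  | [] => false
  | x :: xs => if booInner x n 0 first_list then true else booOuter first_list n xs

def boo (first_list : List Int) (second_list : List Int) : Bool :=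
  booOuter first_list (first_list.length : Int) second_list

-- ===== PORT B =====
-- Source B's hand-written binary search `_bsearch` (while lo < hi …), step for step.
-- `(lo + hi) / 2` ports Python's `(lo + hi) // 2` exactly: lo and hi are ≥ 0 at every call,
-- where Lean's Euclidean division agrees with Python's floor division; `getD mid.toNat 0`
-- ports `srt[mid]`, whose index is always in range inside the loop.
def bsearch (srt : List Int) (x : Int) (strict : Bool) (lo hi : Int) : Int :=
  if _h : lo < hi then
    let mid := (lo + hi) / 2
    if srt.getD mid.toNat 0 < x || (strict && srt.getD mid.toNat 0 == x) then
      bsearch srt x strict (mid + 1) hi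
    else
      bsearch srt x strict lo mid
  else lo
termination_by (hi - lo).toNat
decreasing_by all_goals omega

def boo_alt (first_list : List Int) (second_list : List Int) : Bool :=
  if first_list = [] then false
  else
    let srt := PySem.List.sorted first_list (fun y => y) false
    let half : Int := PySem.Int.floordiv (srt.length : Int) 2
    second_list.any (fun x =>
      bsearch srt x true 0 (srt.length : Int) - bsearch srt x false 0 (srt.length : Int) ≥ half)

-- ===== PRECONDITION & SPEC =====
def Spec_boo (first_list : List Int) (second_list : List Int) (out : Bool) : Prop := out = boo_alt first_list second_list
instance (first_list : List Int) (second_list : List Int) (out : Bool) : Decidable (Spec_boo first_list second_list out) := by unfold Spec_boo; infer_instance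

-- ===== CLAIM =====
def Claim_equal_boo : Prop := ∀ (first_list : List Int) (second_list : List Int), Dom_boo first_list second_list → Spec_boo first_list second_list (boo first_list second_list)

-- ===== LEMMAS AND PROOFS =====

-- A's inner loop returns true iff the list is nonempty and the final count reaches n//2.
theorem booInner_eq (x n : Int) (l : List Int) : ∀ c : Int,
    booInner x n c l = decide (l ≠ [] ∧ PySem.Int.floordiv n 2 ≤ c + (l.count x : Int)) := by
  induction l with
  | nil => intro c; simp [booInner]
  | cons y ys ih =>
    intro c
    simp only [booInner, ih]
    set c' := (if x == y then c + 1 else c) with hc'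
    have hcc : c' + (ys.count x : Int) = c + (((y :: ys).count x : Int)) := by
      rw [hc', List.count_cons]
      by_cases h : x == y
      · have hyx : (y == x) = true := by rw [beq_iff_eq] at h ⊢; omega
        rw [if_pos h, if_pos hyx]; push_cast; ring
      · have hyx : ¬ (y == x) = true := by rw [beq_iff_eq] at h ⊢; omega
        rw [if_neg h, if_neg hyx]; push_cast; ring
    by_cases h1 : c' ≥ PySem.Int.floordiv n 2
    · rw [if_pos h1]
      have h2 : PySem.Int.floordiv n 2 ≤ c + ((y :: ys).count x : Int) := by
        have := Int.natCast_nonneg (ys.count x); omega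
      exact (decide_eq_true ⟨List.cons_ne_nil _ _, h2⟩).symm
    · rw [if_neg h1]
      rcases Decidable.em (ys = []) with he | he
      · subst he
        have h2 : ¬ PySem.Int.floordiv n 2 ≤ c + (([y] : List Int).count x : Int) := by
          have h3 : c' + (([] : List Int).count x : Int) = c + (([y] : List Int).count x : Int) := hcc
          simp only [List.count_nil, Nat.cast_zero, add_zero] at h3
          omega
        rw [decide_eq_decide]
        exact ⟨fun hp => absurd rfl hp.1, fun hp => absurd hp.2 h2⟩
      · rw [decide_eq_decide, hcc]
        exact ⟨fun h2 => ⟨List.cons_ne_nil _ _, h2.2⟩, fun h2 => ⟨he, h2.2⟩⟩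

-- A's outer loop is an 'any' over second_list.
theorem booOuter_eq (first_list : List Int) (n : Int) (l : List Int) :
    booOuter first_list n l = l.any (fun x => booInner x n 0 first_list) := by
  induction l with
  | nil => simp [booOuter]
  | cons x xs ih =>
    simp only [booOuter, ih, List.any_cons]
    by_cases h : booInner x n 0 first_list <;> simp [h]

-- In a ≤-sorted list, a downward-closed predicate holds exactly on the first countP elements.
theorem countP_prefix (p : Int → Bool) (hmono : ∀ a b : Int, a ≤ b → p b = true → p a = true) :
    ∀ (l : List Int), l.Pairwise (· ≤ ·) → ∀ i (h : i < l.length),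
      (p l[i] = true ↔ i < l.countP p) := by
  intro l hl
  induction l with
  | nil => intro i h; simp at h
  | cons y ys ih =>
    rw [List.pairwise_cons] at hl
    intro i h
    rcases hl with ⟨hy, hys⟩
    by_cases hpy : p y = true
    · have hcnt : (y :: ys).countP p = ys.countP p + 1 := by
        simp [hpy]
      cases i with
      | zero => simpa [hcnt] using hpy
      | succ j =>
        have hj : j < ys.length := by simpa using h
        have := ih hys j hj
        simpa [hcnt, Nat.succ_lt_succ_iff] using this
    · have hall : ∀ z ∈ ys, ¬ p z = true := by
        intro z hz hpz
        exact hpy (hmono y z (hy z hz) hpz)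
      have hys0 : ys.countP p = 0 := List.countP_eq_zero.mpr (by simpa using hall)
      have hcnt : (y :: ys).countP p = 0 := by simp [hpy, hys0]
      rw [hcnt]
      cases i with
      | zero => simp [hpy]
      | succ j =>
        have hj : j < ys.length := by simpa using h
        have : ¬ p ys[j] = true := hall _ (List.getElem_mem hj)
        simp [this]

-- the predicate Source B's branch condition decides
def pkey (strict : Bool) (x y : Int) : Bool := if strict then decide (y ≤ x) else decide (y < x)

theorem pkey_mono (strict : Bool) (x : Int) : ∀ a b : Int, a ≤ b → pkey strict x b = true → pkey strict x a = true := by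
  intro a b hab h
  cases strict <;> simp [pkey] at h ⊢ <;> omega

-- Source B's binary search returns countP (pkey strict x) on a sorted list.
theorem bsearch_eq (srt : List Int) (x : Int) (strict : Bool)
    (hs : srt.Pairwise (· ≤ ·)) :
    ∀ (fuel : Nat) (lo hi : Int), (hi - lo).toNat ≤ fuel →
      0 ≤ lo → lo ≤ (srt.countP (pkey strict x) : Int) →
      (srt.countP (pkey strict x) : Int) ≤ hi → hi ≤ (srt.length : Int) →
      bsearch srt x strict lo hi = (srt.countP (pkey strict x) : Int) := by
  intro fuel
  induction fuel with
  | zero =>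
    intro lo hi hfuel h0 hlok hkhi hhil
    rw [bsearch, dif_neg (by omega)]; omega
  | succ fuel ih =>
    intro lo hi hfuel h0 hlok hkhi hhil
    set k : Int := (srt.countP (pkey strict x) : Int) with hk
    rw [bsearch]
    by_cases hlt : lo < hi
    · rw [dif_pos hlt]
      set mid : Int := (lo + hi) / 2 with hmid
      have hmidb : lo ≤ mid ∧ mid < hi := by constructor <;> omega
      have hmn : mid.toNat < srt.length := by omega
      have hget : srt.getD mid.toNat 0 = srt[mid.toNat] := List.getD_eq_getElem srt 0 hmn
      have hcond : (srt.getD mid.toNat 0 < x || (strict && srt.getD mid.toNat 0 == x))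
          = pkey strict x srt[mid.toNat] := by
        rw [hget]; cases strict <;> rw [Bool.eq_iff_iff] <;> simp [pkey] <;> omega
      have hiff := countP_prefix (pkey strict x) (pkey_mono strict x) srt hs mid.toNat hmn
      by_cases hp : pkey strict x srt[mid.toNat] = true
      · have hmk : mid < k := by
          have := hiff.mp hp; omega
        rw [if_pos (by rw [hcond]; exact hp)]
        exact ih (mid + 1) hi (by omega) (by omega) (by omega) hkhi hhil
      · have hkm : k ≤ mid := by
          rcases Decidable.em (mid.toNat < srt.countP (pkey strict x)) with hc | hc
          · exact absurd (hiff.mpr hc) hp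
          · omega
        rw [if_neg (by rw [hcond]; simpa using hp)]
        exact ih lo mid (by omega) h0 hlok hkm (by omega)
    · rw [dif_neg hlt]; omega

-- splitting countP (· ≤ x) as countP (· < x) + count x
theorem countP_le_split (x : Int) (l : List Int) :
    l.countP (pkey true x) = l.countP (pkey false x) + l.count x := by
  induction l with
  | nil => simp
  | cons y ys ih =>
    simp only [List.countP_cons, List.count_cons, ih, pkey]
    by_cases h1 : y < x
    · have h2 : y ≤ x := le_of_lt h1
      have h3 : ¬ (y == x) = true := by rw [beq_iff_eq]; omega
      simp [h1, h2, h3]; omega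
    · by_cases h2 : y = x
      · subst h2
        simp; omega
      · have h3 : ¬ y ≤ x := by omega
        have h4 : ¬ (y == x) = true := by rw [beq_iff_eq]; omega
        simp [h1, h3, h4]

-- B's per-candidate test: the two binary searches differ by exactly count x first_list.
theorem bsearch_count (first_list : List Int) (x : Int) :
    bsearch (PySem.List.sorted first_list (fun y => y) false) x true 0
        ((PySem.List.sorted first_list (fun y => y) false).length : Int)
      - bsearch (PySem.List.sorted first_list (fun y => y) false) x false 0
        ((PySem.List.sorted first_list (fun y => y) false).length : Int)
      = (first_list.count x : Int) := by
  set srt := PySem.List.sorted first_list (fun y => y) false with hsrt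
  have hs : srt.Pairwise (· ≤ ·) := by
    simpa using PySem.List.sorted_pairwise (xs := first_list) (key := fun y => y)
  have hc1 : (srt.countP (pkey true x) : Int) ≤ (srt.length : Int) := by
    exact_mod_cast List.countP_le_length
  have hc2 : (srt.countP (pkey false x) : Int) ≤ (srt.length : Int) := by
    exact_mod_cast List.countP_le_length
  rw [bsearch_eq srt x true hs srt.length 0 (srt.length : Int) (by omega) le_rfl (by positivity) hc1 le_rfl,
      bsearch_eq srt x false hs srt.length 0 (srt.length : Int) (by omega) le_rfl (by positivity) hc2 le_rfl]
  have hperm : srt.Perm first_list := PySem.List.sorted_perm first_list (fun y => y) false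
  rw [← hperm.count_eq x]
  have := countP_le_split x srt
  omega

-- ===== VERDICT =====
theorem boo_spec : Claim_equal_boo := by
  intro first_list second_list _
  unfold Spec_boo boo boo_alt
  rcases Decidable.em (first_list = []) with he | he
  · subst he
    simp [booOuter_eq, booInner_eq]
  · have hlen : ((PySem.List.sorted first_list (fun y => y) false).length : Int)
        = (first_list.length : Int) := by
      exact_mod_cast PySem.List.length_sorted first_list (fun y => y) false
    simp only [he, if_false, booOuter_eq, booInner_eq]
    congr 1
    funext x
    rw [bsearch_count, hlen]
    simp [he, ge_iff_le]
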